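-- pv_equiv track=rewrite | github.com/pypi-data/pypi-mirror-262 | packages/ewokscore/ewokscore-0.7.2.tar.gz/ewokscore-0.7.2/src/ewokscore/persistence/uri.py | merge_query
-- ===== SOURCE A (Python) =====
-- from typing import Iterable, Optional, Tuple, Union
--
-- def split_query(query: str) -> dict:
--     result = dict()
--     for s in query.split("&"):
--         if not s:
--             continue
--         name, _, value = s.partition("=")
--         prev_value = result.get(name)
--         if prev_value:
--             value = join_string(prev_value, value, "/")
--         result[name] = value
--     return result
--
-- def join_query(query_items: Iterable[Tuple[str, str]]) -> str:
--     return "&".join(f"{k}={v}" for k, v in query_items)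
--
-- def join_string(a: str, b: str, sep: str):
--     aslash = a.endswith(sep)
--     bslash = b.startswith(sep)
--     if aslash and bslash:
--         return a[:-1] + b
--     elif aslash or bslash:
--         return a + b
--     else:
--         return a + sep + b
--
-- def merge_query(query1: str, query2: str) -> str:
--     query1 = split_query(query1)
--     query2 = split_query(query2)
--     merged = list()
--     names = list(query1) + list(query2)
--     for name in names:
--         value1 = query1.pop(name, None)
--         value2 = query2.pop(name, None)
--         if value1 and value2:
--             merged.append((name, join_string(value1, value2, "/")))
--         elif value1:
--             merged.append((name, value1))
--         elif value2:
--             merged.append((name, value2))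
--     return join_query(merged)
-- ===== SOURCE B (Python) =====
-- def merge_query(query1: str, query2: str) -> str:
--     def parse(query):
--         return [s.partition("=") for s in query.split("&") if s]
--
--     def glue(a, b):
--         if a.endswith("/") and b.startswith("/"):
--             return a[:-1] + b
--         if a.endswith("/") or b.startswith("/"):
--             return a + b
--         return a + "/" + b
--
--     def collapse(pairs, key):
--         acc = ""
--         for k, _, v in pairs:
--             if k == key:
--                 acc = glue(acc, v) if acc else v
--         return acc
--
--     pairs1 = parse(query1)
--     pairs2 = parse(query2)
--     out = []
--     seen = set()
--     for k, _, _ in pairs1 + pairs2: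
--         if k in seen:
--             continue
--         seen.add(k)
--         v1 = collapse(pairs1, k)
--         v2 = collapse(pairs2, k)
--         if v1 and v2:
--             out.append(k + "=" + glue(v1, v2))
--         elif v1 or v2:
--             out.append(k + "=" + (v1 or v2))
--     return "&".join(out)
-- ===== Notes on version B (the rewrite author's own statement) =====
-- stated objective: alternative
-- what changed: Replaces A's two mutable dicts and destructive pop-loop by dict-free list processing: queries are parsed to pair lists, each key's merged value is recomputed by a filtered fold (collapse) at the key's first occurrence, with a seen-set doing the deduplication.
import Mathlib
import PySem

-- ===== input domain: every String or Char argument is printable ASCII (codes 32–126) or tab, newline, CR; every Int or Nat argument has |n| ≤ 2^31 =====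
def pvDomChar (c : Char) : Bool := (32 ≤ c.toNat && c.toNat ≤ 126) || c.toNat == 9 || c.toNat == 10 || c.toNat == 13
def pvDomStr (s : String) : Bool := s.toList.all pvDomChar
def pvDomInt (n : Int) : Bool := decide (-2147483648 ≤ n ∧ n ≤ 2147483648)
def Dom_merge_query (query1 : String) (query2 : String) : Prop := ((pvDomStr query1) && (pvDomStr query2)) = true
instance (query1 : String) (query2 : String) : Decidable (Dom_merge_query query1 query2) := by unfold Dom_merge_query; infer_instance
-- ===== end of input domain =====

-- B replaces A's two mutable dicts and destructive pop-loop by dict-free per-key folds over the parsed pair lists (alternative decomposition, same cost class on typical queries).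

-- ===== PORT A =====
-- hand port of s.partition("="): split at the FIRST '='; only the (before, after) components are used by the Python, so the middle component is dropped — exact.
def pyPartitionEq : List Char → List Char × List Char
  | [] => ([], [])
  | c :: rest =>
    if c = '=' then ([], rest)
    else
      let p := pyPartitionEq rest
      (c :: p.1, p.2)

def joinStringA (a b sep : List Char) : List Char :=
  let aslash := PySem.Chars.endswith a sep
  let bslash := PySem.Chars.startswith b sep
  if aslash && bslash then PySem.Chars.slice a none (some (-1)) ++ b
  else if aslash || bslash then a ++ b
  else a ++ sep ++ b

-- Python truthiness of an optional string: None and "" are falsy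
def truthyA (o : Option (List Char)) : Bool := o.getD [] != []

def splitQueryA (query : List Char) : PySem.Dict (List Char) (List Char) :=
  (PySem.Chars.splitOn query ['&']).foldl
    (fun result s =>
      if s = [] then result
      else
        let p := pyPartitionEq s
        let value :=
          if truthyA (result.get? p.1) then joinStringA ((result.get? p.1).getD []) p.2 ['/']
          else p.2
        result.insert p.1 value)
    PySem.Dict.empty

def joinQueryA (items : List (List Char × List Char)) : List Char :=
  PySem.Chars.join ['&'] (items.map (fun kv => kv.1 ++ ['='] ++ kv.2))

def mergeLoopA :
    List (List Char) → PySem.Dict (List Char) (List Char) →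
    PySem.Dict (List Char) (List Char) → List (List Char × List Char) →
    List (List Char × List Char)
  | [], _, _, merged => merged
  | name :: rest, d1, d2, merged =>
    let value1 := d1.get? name      -- value1 = query1.pop(name, None)
    let d1' := d1.erase name
    let value2 := d2.get? name      -- value2 = query2.pop(name, None)
    let d2' := d2.erase name
    let merged' :=
      if truthyA value1 && truthyA value2 then
        merged ++ [(name, joinStringA (value1.getD []) (value2.getD []) ['/'])]
      else if truthyA value1 then merged ++ [(name, value1.getD [])]
      else if truthyA value2 then merged ++ [(name, value2.getD [])]
      else merged
    mergeLoopA rest d1' d2' merged'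

def merge_query (query1 : String) (query2 : String) : String :=
  let d1 := splitQueryA query1.toList
  let d2 := splitQueryA query2.toList
  let names := d1.keys ++ d2.keys
  String.mk (joinQueryA (mergeLoopA names d1 d2 []))

-- ===== PORT B =====
def glueB (a b : List Char) : List Char :=
  if PySem.Chars.endswith a ['/'] && PySem.Chars.startswith b ['/'] then
    PySem.Chars.slice a none (some (-1)) ++ b
  else if PySem.Chars.endswith a ['/'] || PySem.Chars.startswith b ['/'] then a ++ b
  else a ++ '/' :: b

def parseB (query : List Char) : List (List Char × List Char) :=
  ((PySem.Chars.splitOn query ['&']).filter (fun s => s ≠ [])).map pyPartitionEq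

def collapseB (pairs : List (List Char × List Char)) (key : List Char) : List Char :=
  pairs.foldl (fun acc kv => if kv.1 = key then (if acc ≠ [] then glueB acc kv.2 else kv.2) else acc) []

def mergeLoopB (pairs1 pairs2 : List (List Char × List Char)) :
    List (List Char × List Char) → PySem.Set (List Char) → List (List Char) → List (List Char)
  | [], _, out => out
  | kv :: rest, seen, out =>
    if PySem.Set.contains seen kv.1 then mergeLoopB pairs1 pairs2 rest seen out
    else
      let seen' := PySem.Set.add seen kv.1
      let v1 := collapseB pairs1 kv.1
      let v2 := collapseB pairs2 kv.1
      if v1 ≠ [] ∧ v2 ≠ [] then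
        mergeLoopB pairs1 pairs2 rest seen' (out ++ [kv.1 ++ '=' :: glueB v1 v2])
      else if v1 ≠ [] ∨ v2 ≠ [] then
        mergeLoopB pairs1 pairs2 rest seen' (out ++ [kv.1 ++ '=' :: (if v1 ≠ [] then v1 else v2)])
      else mergeLoopB pairs1 pairs2 rest seen' out

def merge_query_alt (query1 : String) (query2 : String) : String :=
  let pairs1 := parseB query1.toList
  let pairs2 := parseB query2.toList
  String.mk (PySem.Chars.join ['&'] (mergeLoopB pairs1 pairs2 (pairs1 ++ pairs2) PySem.Set.empty []))

-- ===== PRECONDITION & SPEC =====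
def Spec_merge_query (query1 : String) (query2 : String) (out : String) : Prop := out = merge_query_alt query1 query2
instance (query1 : String) (query2 : String) (out : String) : Decidable (Spec_merge_query query1 query2 out) := by unfold Spec_merge_query; infer_instance

-- ===== CLAIM (what is proved, stated in full; the proofs are below) =====
def Claim_equal_merge_query : Prop := ∀ (query1 : String) (query2 : String), Dom_merge_query query1 query2 → Spec_merge_query query1 query2 (merge_query query1 query2)

-- ===== LEMMAS AND PROOFS =====

theorem joinStringA_eq_glueB (a b : List Char) : joinStringA a b ['/'] = glueB a b := by
  simp [joinStringA, glueB]

-- ordered dedup relative to an already-seen list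
def dedupFrom (seen : List (List Char)) : List (List Char) → List (List Char)
  | [] => []
  | k :: ks => if k ∈ seen then dedupFrom seen ks else k :: dedupFrom (k :: seen) ks

theorem dedupFrom_congr {s t : List (List Char)} (l : List (List Char))
    (h : ∀ x, x ∈ s ↔ x ∈ t) : dedupFrom s l = dedupFrom t l := by
  induction l generalizing s t with
  | nil => rfl
  | cons k ks ih =>
    simp only [dedupFrom]
    by_cases hk : k ∈ s
    · rw [if_pos hk, if_pos ((h k).mp hk), ih h]
    · rw [if_neg hk, if_neg (fun hh => hk ((h k).mpr hh)),
        ih (s := k :: s) (t := k :: t) (fun x => by simp [h x])]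

theorem mem_dedupFrom {x : List Char} {s l : List (List Char)} :
    x ∈ dedupFrom s l ↔ x ∈ l ∧ x ∉ s := by
  induction l generalizing s with
  | nil => simp [dedupFrom]
  | cons k ks ih =>
    simp only [dedupFrom]
    by_cases hk : k ∈ s
    · rw [if_pos hk, ih]
      constructor
      · rintro ⟨h1, h2⟩; exact ⟨List.mem_cons_of_mem _ h1, h2⟩
      · rintro ⟨h1, h2⟩
        rcases List.mem_cons.mp h1 with rfl | h1
        · exact absurd hk h2
        · exact ⟨h1, h2⟩
    · rw [if_neg hk]
      simp only [List.mem_cons, ih, List.mem_cons]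
      constructor
      · rintro (rfl | ⟨h1, h2⟩)
        · exact ⟨Or.inl rfl, hk⟩
        · exact ⟨Or.inr h1, fun hx => h2 (Or.inr hx)⟩
      · rintro ⟨rfl | h1, h2⟩
        · exact Or.inl rfl
        · by_cases hxk : x = k
          · exact Or.inl hxk
          · exact Or.inr ⟨h1, fun hx => by
              rcases hx with rfl | hx
              · exact hxk rfl
              · exact h2 hx⟩

theorem dedupFrom_append (s l1 l2 : List (List Char)) :
    dedupFrom s (l1 ++ l2) = dedupFrom s l1 ++ dedupFrom (l1 ++ s) l2 := by
  induction l1 generalizing s with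
  | nil => rfl
  | cons k ks ih =>
    simp only [List.cons_append, dedupFrom]
    by_cases hk : k ∈ s
    · rw [if_pos hk, if_pos hk, ih,
        dedupFrom_congr (s := ks ++ s) (t := k :: (ks ++ s)) l2
          (fun x => by simp only [List.mem_append, List.mem_cons]; aesop)]
    · rw [if_neg hk, if_neg hk, ih,
        dedupFrom_congr (s := ks ++ k :: s) (t := k :: (ks ++ s)) l2
          (fun x => by simp only [List.mem_append, List.mem_cons]; aesop),
        List.cons_append]

theorem dedupFrom_dedupFrom (s t l : List (List Char)) :
    dedupFrom s (dedupFrom t l) = dedupFrom (s ++ t) l := by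
  induction l generalizing s t with
  | nil => rfl
  | cons k ks ih =>
    simp only [dedupFrom]
    by_cases ht : k ∈ t
    · rw [if_pos ht, if_pos (by simp [ht] : k ∈ s ++ t), ih]
    · rw [if_neg ht]
      by_cases hs : k ∈ s
      · simp only [dedupFrom, if_pos hs, if_pos (by simp [hs] : k ∈ s ++ t)]
        rw [ih, dedupFrom_congr (s := s ++ k :: t) (t := s ++ t) ks
          (fun x => by simp only [List.mem_append, List.mem_cons]; aesop)]
      · simp only [dedupFrom, if_neg hs, if_neg (by simp [hs, ht] : ¬ (k ∈ s ++ t))]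
        rw [ih, dedupFrom_congr (s := (k :: s) ++ (k :: t)) (t := k :: (s ++ t)) ks
          (fun x => by simp only [List.mem_append, List.mem_cons]; aesop)]

-- step of collapseB, named for the proofs
def cstep (k : List Char) (acc : List Char) (kv : List Char × List Char) : List Char :=
  if kv.1 = k then (if acc ≠ [] then glueB acc kv.2 else kv.2) else acc

theorem collapseB_eq_foldl (p : List (List Char × List Char)) (k : List Char) :
    collapseB p k = p.foldl (cstep k) [] := rfl

-- get?/getD through erase
theorem find?_filter_ne (l : List (List Char × List Char)) (k x : List Char) :
    (l.filter (fun p => !(p.1 == k))).find? (fun p => p.1 == x) =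
      if x = k then none else l.find? (fun p => p.1 == x) := by
  induction l with
  | nil => simp
  | cons p rest ih =>
    simp only [List.filter_cons]
    by_cases hpk : p.1 = k
    · rw [if_neg (by simp [hpk]), ih]
      by_cases hxk : x = k
      · simp [hxk]
      · have hpx : (p.1 == x) = false := by
          simp only [beq_eq_false_iff_ne, ne_eq, hpk]
          exact fun h => hxk h.symm
        rw [if_neg hxk, if_neg hxk, List.find?_cons_of_neg (by simp [hpx])]
    · rw [if_pos (by simp [hpk])]
      by_cases hpx : p.1 = x
      · have hxk : ¬ x = k := fun h => hpk (by rw [hpx, h])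
        rw [List.find?_cons_of_pos (by simp [hpx]), if_neg hxk,
          List.find?_cons_of_pos (by simp [hpx])]
      · rw [List.find?_cons_of_neg (by simp [hpx]), ih]
        by_cases hxk : x = k
        · simp [hxk]
        · rw [if_neg hxk, if_neg hxk, List.find?_cons_of_neg (by simp [hpx])]

theorem get?_erase_pv (d : PySem.Dict (List Char) (List Char)) (k x : List Char) :
    (d.erase k).get? x = if x = k then none else d.get? x := by
  rcases d with ⟨l⟩
  simp only [PySem.Dict.erase, PySem.Dict.get?, find?_filter_ne]
  split_ifs <;> rfl

theorem getD_erase_pv (d : PySem.Dict (List Char) (List Char)) (k x : List Char) :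
    (d.erase k).getD x [] = if x = k then [] else d.getD x [] := by
  simp only [PySem.Dict.getD_eq_get?_getD, get?_erase_pv]
  split_ifs <;> rfl

-- A's split_query dict, looked up with default "", is B's collapse
theorem splitFold_getD (ss : List (List Char)) (d : PySem.Dict (List Char) (List Char)) (k : List Char) :
    ((ss.foldl
      (fun result s =>
        if s = [] then result
        else
          let p := pyPartitionEq s
          let value :=
            if truthyA (result.get? p.1) then joinStringA ((result.get? p.1).getD []) p.2 ['/']
            else p.2
          result.insert p.1 value) d).getD k []) =
    ((ss.filter (fun s => s ≠ [])).map pyPartitionEq).foldl (cstep k) (d.getD k []) := by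
  induction ss generalizing d with
  | nil => rfl
  | cons s rest ih =>
    by_cases hs : s = []
    · simp only [List.foldl_cons, if_pos hs, List.filter_cons, hs]
      simpa using ih d
    · simp only [List.foldl_cons, if_neg hs, List.filter_cons]
      rw [if_pos (by simp [hs] : decide (s ≠ []) = true)]
      simp only [List.map_cons, List.foldl_cons]
      rw [ih]
      congr 1
      rw [PySem.Dict.getD_insert]
      by_cases hk : k = (pyPartitionEq s).1
      · subst hk
        by_cases hnn : (d.get? (pyPartitionEq s).1).getD [] = [] <;>
          simp [cstep, truthyA, hnn, joinStringA_eq_glueB, PySem.Dict.getD_eq_get?_getD]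
      · rw [if_neg hk]
        simp only [cstep, if_neg (fun h : (pyPartitionEq s).1 = k => hk h.symm)]

theorem splitFold_keys (ss : List (List Char)) (d : PySem.Dict (List Char) (List Char)) :
    (ss.foldl
      (fun result s =>
        if s = [] then result
        else
          let p := pyPartitionEq s
          let value :=
            if truthyA (result.get? p.1) then joinStringA ((result.get? p.1).getD []) p.2 ['/']
            else p.2
          result.insert p.1 value) d).keys =
    d.keys ++ dedupFrom d.keys (((ss.filter (fun s => s ≠ [])).map pyPartitionEq).map (·.1)) := by
  induction ss generalizing d with
  | nil => simp [dedupFrom]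
  | cons s rest ih =>
    by_cases hs : s = []
    · simp only [List.foldl_cons, if_pos hs, List.filter_cons, hs]
      simpa using ih d
    · simp only [List.foldl_cons, if_neg hs, List.filter_cons]
      rw [if_pos (by simp [hs] : decide (s ≠ []) = true)]
      simp only [List.map_cons, List.foldl_cons, dedupFrom]
      rw [ih]
      by_cases hc : d.contains (pyPartitionEq s).1 = true
      · rw [PySem.Dict.keys_insert_of_contains _ _ hc,
          if_pos ((PySem.Dict.contains_iff_mem_keys _ _).mp hc)]
      · have hcf : d.contains (pyPartitionEq s).1 = false := by simpa using hc
        rw [PySem.Dict.keys_insert_of_not_contains _ _ hcf,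
          if_neg (fun h => hc ((PySem.Dict.contains_iff_mem_keys _ _).mpr h)),
          List.append_assoc, List.singleton_append]
        rw [dedupFrom_congr (s := d.keys ++ [(pyPartitionEq s).1])
          (t := (pyPartitionEq s).1 :: d.keys) _
          (fun x => by simp only [List.mem_append, List.mem_singleton, List.mem_cons]; tauto)]

-- the per-key emitted pair (A's shape)
def emitPair (v1 v2 : List Char) (k : List Char) : Option (List Char × List Char) :=
  if v1 ≠ [] ∧ v2 ≠ [] then some (k, glueB v1 v2)
  else if v1 ≠ [] then some (k, v1)
  else if v2 ≠ [] then some (k, v2)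
  else none

theorem mergeLoopA_spec (D1 D2 : PySem.Dict (List Char) (List Char)) :
    ∀ (names seen : List (List Char)) (d1 d2 : PySem.Dict (List Char) (List Char))
      (acc : List (List Char × List Char)),
    (∀ x, d1.getD x [] = if x ∈ seen then [] else D1.getD x []) →
    (∀ x, d2.getD x [] = if x ∈ seen then [] else D2.getD x []) →
    mergeLoopA names d1 d2 acc =
      acc ++ (dedupFrom seen names).filterMap
        (fun k => emitPair (D1.getD k []) (D2.getD k []) k) := by
  intro names
  induction names with
  | nil => intro seen d1 d2 acc _ _; simp [mergeLoopA, dedupFrom]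
  | cons n rest ih =>
    intro seen d1 d2 acc h1 h2
    have e1 : ∀ x, (d1.erase n).getD x [] = if x ∈ n :: seen then [] else D1.getD x [] := by
      intro x; rw [getD_erase_pv, h1 x]; by_cases hx : x = n <;> simp [hx]
    have e2 : ∀ x, (d2.erase n).getD x [] = if x ∈ n :: seen then [] else D2.getD x [] := by
      intro x; rw [getD_erase_pv, h2 x]; by_cases hx : x = n <;> simp [hx]
    simp only [mergeLoopA, dedupFrom]
    by_cases hn : n ∈ seen
    · rw [if_pos hn]
      have t1 : truthyA (d1.get? n) = false := by
        simp [truthyA, ← PySem.Dict.getD_eq_get?_getD, h1 n, hn]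
      have t2 : truthyA (d2.get? n) = false := by
        simp [truthyA, ← PySem.Dict.getD_eq_get?_getD, h2 n, hn]
      have h1' : ∀ x, (d1.erase n).getD x [] = if x ∈ seen then [] else D1.getD x [] := by
        intro x; rw [e1 x]; by_cases hx : x = n
        · subst hx; simp [hn]
        · simp [hx]
      have h2' : ∀ x, (d2.erase n).getD x [] = if x ∈ seen then [] else D2.getD x [] := by
        intro x; rw [e2 x]; by_cases hx : x = n
        · subst hx; simp [hn]
        · simp [hx]
      rw [t1, t2]
      simp only [Bool.false_and, Bool.false_eq_true, if_neg (by simp : ¬ (false = true))]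
      exact ih seen _ _ acc h1' h2'
    · rw [if_neg hn]
      have w1 : (d1.get? n).getD [] = D1.getD n [] := by
        rw [← PySem.Dict.getD_eq_get?_getD, h1 n, if_neg hn]
      have w2 : (d2.get? n).getD [] = D2.getD n [] := by
        rw [← PySem.Dict.getD_eq_get?_getD, h2 n, if_neg hn]
      have t1 : truthyA (d1.get? n) = (D1.getD n [] != []) := by simp only [truthyA, w1]
      have t2 : truthyA (d2.get? n) = (D2.getD n [] != []) := by simp only [truthyA, w2]
      have ih' : ∀ acc, mergeLoopA rest (d1.erase n) (d2.erase n) acc =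
          acc ++ List.filterMap (fun k => emitPair (D1.getD k []) (D2.getD k []) k)
            (dedupFrom (n :: seen) rest) := fun acc => ih (n :: seen) _ _ acc e1 e2
      by_cases q1 : D1.getD n [] = [] <;> by_cases q2 : D2.getD n [] = [] <;>
        simp [t1, t2, w1, w2, q1, q2, ih', emitPair, List.filterMap_cons,
          joinStringA_eq_glueB, List.append_assoc]

theorem mergeLoopB_spec (p1 p2 : List (List Char × List Char)) :
    ∀ (pairs : List (List Char × List Char)) (seen : PySem.Set (List Char))
      (seenL : List (List Char)) (out : List (List Char)),
    (∀ x, PySem.Set.contains seen x = true ↔ x ∈ seenL) →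
    mergeLoopB p1 p2 pairs seen out =
      out ++ (dedupFrom seenL (pairs.map (·.1))).filterMap
        (fun k => (emitPair (collapseB p1 k) (collapseB p2 k) k).map
          (fun kv => kv.1 ++ ['='] ++ kv.2)) := by
  intro pairs
  induction pairs with
  | nil => intro seen seenL out _; simp [mergeLoopB, dedupFrom]
  | cons kv rest ih =>
    intro seen seenL out hs
    simp only [mergeLoopB, List.map_cons, dedupFrom]
    by_cases hn : kv.1 ∈ seenL
    · rw [if_pos ((hs kv.1).mpr hn), if_pos hn]
      exact ih seen seenL out hs
    · rw [if_neg (fun h => hn ((hs kv.1).mp h)), if_neg hn]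
      have hmem : ∀ x, x ∈ seen ↔ x ∈ seenL := by
        intro x
        rw [← hs x]
        simp [PySem.Set.contains, List.contains_iff_mem]
      have hs' : ∀ x, PySem.Set.contains (PySem.Set.add seen kv.1) x = true ↔ x ∈ kv.1 :: seenL := by
        intro x
        have hc : (PySem.Set.contains (PySem.Set.add seen kv.1) x = true) ↔ x ∈ PySem.Set.add seen kv.1 := by
          simp [PySem.Set.contains, List.contains_iff_mem]
        rw [hc, PySem.Set.mem_add, List.mem_cons, hmem x]
        tauto
      have ih' : ∀ out, mergeLoopB p1 p2 rest (PySem.Set.add seen kv.1) out =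
          out ++ (dedupFrom (kv.1 :: seenL) (rest.map (·.1))).filterMap
            (fun k => (emitPair (collapseB p1 k) (collapseB p2 k) k).map
              (fun kv => kv.1 ++ ['='] ++ kv.2)) :=
        fun out => ih (PySem.Set.add seen kv.1) (kv.1 :: seenL) out hs'
      by_cases q1 : collapseB p1 kv.1 = [] <;> by_cases q2 : collapseB p2 kv.1 = [] <;>
        simp [q1, q2, ih', emitPair, List.filterMap_cons, List.append_assoc]

theorem filterMap_congr_pv (f g : List Char → Option (List Char)) (l : List (List Char))
    (h : ∀ x ∈ l, f x = g x) : l.filterMap f = l.filterMap g := by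
  induction l with
  | nil => rfl
  | cons a l ih =>
    simp only [List.filterMap_cons, h a (List.mem_cons_self)]
    rw [ih (fun x hx => h x (List.mem_cons_of_mem _ hx))]

-- ===== VERDICT (by name: the statement is the Claim_ definition above) =====
set_option maxHeartbeats 1000000 in
theorem merge_query_spec : Claim_equal_merge_query := by
  unfold Claim_equal_merge_query
  intro query1 query2 _
  unfold Spec_merge_query merge_query merge_query_alt
  -- abbreviations
  set P1 := parseB query1.toList with hP1
  set P2 := parseB query2.toList with hP2
  set D1 := splitQueryA query1.toList with hD1
  set D2 := splitQueryA query2.toList with hD2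
  set K1 := P1.map (fun x => x.1) with hK1
  set K2 := P2.map (fun x => x.1) with hK2
  have get1 : ∀ k, D1.getD k [] = collapseB P1 k := by
    intro k
    rw [hD1, hP1]
    show (((PySem.Chars.splitOn query1.toList ['&']).foldl _ PySem.Dict.empty).getD k []) = _
    rw [splitFold_getD, collapseB_eq_foldl]
    simp [parseB, PySem.Dict.getD_eq_get?_getD, PySem.Dict.get?_empty]
  have get2 : ∀ k, D2.getD k [] = collapseB P2 k := by
    intro k
    rw [hD2, hP2]
    show (((PySem.Chars.splitOn query2.toList ['&']).foldl _ PySem.Dict.empty).getD k []) = _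
    rw [splitFold_getD, collapseB_eq_foldl]
    simp [parseB, PySem.Dict.getD_eq_get?_getD, PySem.Dict.get?_empty]
  have key1 : D1.keys = dedupFrom [] K1 := by
    rw [hD1, hK1, hP1]
    show ((PySem.Chars.splitOn query1.toList ['&']).foldl _ PySem.Dict.empty).keys = _
    rw [splitFold_keys]
    simp [parseB, PySem.Dict.keys, PySem.Dict.empty]
  have key2 : D2.keys = dedupFrom [] K2 := by
    rw [hD2, hK2, hP2]
    show ((PySem.Chars.splitOn query2.toList ['&']).foldl _ PySem.Dict.empty).keys = _
    rw [splitFold_keys]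
    simp [parseB, PySem.Dict.keys, PySem.Dict.empty]
  dsimp only []
  -- A side
  rw [mergeLoopA_spec D1 D2 (D1.keys ++ D2.keys) [] D1 D2 []
    (fun x => by simp) (fun x => by simp)]
  -- B side
  rw [mergeLoopB_spec P1 P2 (P1 ++ P2) PySem.Set.empty [] []
    (fun x => by simp [PySem.Set.empty, PySem.Set.contains])]
  -- align the dedup key lists
  have hdd : dedupFrom [] (D1.keys ++ D2.keys) = dedupFrom [] ((P1 ++ P2).map (fun x => x.1)) := by
    rw [key1, key2, List.map_append, ← hK1, ← hK2,
      dedupFrom_append, dedupFrom_append, List.append_nil,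
      dedupFrom_dedupFrom, List.nil_append,
      dedupFrom_congr (s := dedupFrom [] K1) (t := K1 ++ []) (dedupFrom [] K2)
        (fun x => by simp [mem_dedupFrom]),
      dedupFrom_dedupFrom, List.append_nil]
  rw [hdd]
  -- align the emitted strings
  unfold joinQueryA
  simp only [List.nil_append]
  rw [List.map_filterMap]
  exact congrArg String.mk (congrArg (PySem.Chars.join ['&'])
    (filterMap_congr_pv
      (fun x => Option.map (fun kv => kv.1 ++ ['='] ++ kv.2) (emitPair (D1.getD x []) (D2.getD x []) x))
      (fun k => Option.map (fun kv => kv.1 ++ ['='] ++ kv.2) (emitPair (collapseB P1 k) (collapseB P2 k) k))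
      _ (fun k _ => by simp only [get1, get2])))
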